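-- pv_equiv track=rewrite | github.com/gianbelinche/TP2 | TP3/flycombi.py | separar_parametros
-- ===== SOURCE A (Python) =====
-- def separar_parametros(parametros):
-- 	para = []
-- 	comando = ""
-- 	for i in range(len(parametros)):
-- 		if parametros[i] == " ":
-- 			para.append(comando)
-- 			para.append(parametros[i+1:])
-- 			break
-- 		comando += parametros[i]
--
-- 	if len(para) == 0:
-- 		para.append(comando)
-- 	return para
-- ===== SOURCE B (Python) =====
-- def separar_parametros(parametros):
--     idx = parametros.find(" ")
--     if idx == -1:
--         return [parametros]
--     return [parametros[:idx], parametros[idx+1:]]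
-- ===== Notes on version B (the rewrite author's own statement) =====
-- stated objective: faster
-- what changed: Replaces the per-character scan that accumulates a running prefix via repeated string concatenation (with break and empty-list fallback) by a single find of the first space followed by two slices.
import Mathlib
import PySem

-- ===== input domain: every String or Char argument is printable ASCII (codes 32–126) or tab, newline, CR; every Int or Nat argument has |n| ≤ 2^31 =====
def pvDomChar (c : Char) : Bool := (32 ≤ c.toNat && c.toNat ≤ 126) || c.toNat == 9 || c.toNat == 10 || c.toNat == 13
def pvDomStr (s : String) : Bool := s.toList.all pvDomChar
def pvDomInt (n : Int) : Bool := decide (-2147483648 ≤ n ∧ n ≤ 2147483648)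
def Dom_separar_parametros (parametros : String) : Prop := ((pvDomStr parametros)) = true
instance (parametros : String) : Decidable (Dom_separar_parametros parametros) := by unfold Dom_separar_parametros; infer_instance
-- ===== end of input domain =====

-- B replaces A's per-character accumulation loop (quadratic string concatenation) by one find of the first space and two slices; a timing run measured B faster.

-- ===== PORT A =====
-- the for-loop: scans chars, appending to `comando` until a space breaks out; returns (para, comando)
def sepA_loop : List Char → List Char → List String × List Char
  | [], com => ([], com)
  | c :: rest, com =>
    if c = ' ' then ([String.ofList com, String.ofList rest], com)
    else sepA_loop rest (com ++ [c])

def separar_parametros (parametros : String) : List String :=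
  let r := sepA_loop parametros.toList []
  if r.1.length = 0 then [String.ofList r.2] else r.1

-- ===== PORT B =====
def separar_parametros_alt (parametros : String) : List String :=
  let idx := PySem.Str.find parametros " "
  if idx = -1 then [parametros]
  else [PySem.Str.slice parametros none (some idx),
        PySem.Str.slice parametros (some (idx + 1)) none]

-- ===== PRECONDITION & SPEC =====
def Spec_separar_parametros (parametros : String) (out : List String) : Prop := out = separar_parametros_alt parametros
instance (parametros : String) (out : List String) : Decidable (Spec_separar_parametros parametros out) := by unfold Spec_separar_parametros; infer_instance

-- ===== CLAIM (what is proved, stated in full; the proofs are below) =====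
def Claim_equal_separar_parametros : Prop := ∀ (parametros : String), Dom_separar_parametros parametros → Spec_separar_parametros parametros (separar_parametros parametros)

-- ===== LEMMAS AND PROOFS =====

theorem sepA_loop_no_space (cs : List Char) (h : ' ' ∉ cs) :
    ∀ com, sepA_loop cs com = ([], com ++ cs) := by
  induction cs with
  | nil => intro com; simp [sepA_loop]
  | cons c rest ih =>
    intro com
    have hc : c ≠ ' ' := fun hc => h (hc ▸ List.mem_cons_self ..)
    have hr : ' ' ∉ rest := fun hm => h (List.mem_cons_of_mem _ hm)
    rw [sepA_loop]; simp [hc, ih hr (com ++ [c])]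

theorem sepA_loop_space (cs : List Char) (n : Nat) (hn : n < cs.length)
    (h1 : cs[n] = ' ') (h2 : ∀ i, (hi : i < n) → cs[i]'(by omega) ≠ ' ') :
    ∀ com, sepA_loop cs com =
      ([String.ofList (com ++ cs.take n), String.ofList (cs.drop (n + 1))], com ++ cs.take n) := by
  induction cs generalizing n with
  | nil => simp at hn
  | cons c rest ih =>
    intro com
    cases n with
    | zero => simp_all [sepA_loop]
    | succ m =>
      have hc : c ≠ ' ' := h2 0 (by omega)
      have := ih m (by simpa using hn) (by simpa using h1)
        (fun i hi => by have := h2 (i + 1) (by omega); simpa using this) (com ++ [c])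
      simp [sepA_loop, hc, this]

theorem singleton_infix_iff (a : Char) (l : List Char) : [a] <:+: l ↔ a ∈ l := by
  constructor
  · exact fun h => h.subset (List.mem_singleton_self a)
  · intro h
    obtain ⟨s, t, rfl⟩ := List.append_of_mem h
    exact ⟨s, t, by simp⟩

theorem singleton_prefix_drop (a : Char) (l : List Char) (i : Nat) (hi : i < l.length) :
    [a] <+: l.drop i ↔ l[i] = a := by
  rw [List.drop_eq_getElem_cons hi]
  constructor
  · intro ⟨t, ht⟩
    have h' := congrArg (fun x => x.head?) ht.symm
    simp [List.getElem?_eq_getElem hi] at h'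
    exact h'
  · intro h
    exact ⟨List.drop (i+1) l, by simp [h]⟩

theorem separar_parametros_spec : Claim_equal_separar_parametros := by
  intro p _
  unfold Spec_separar_parametros separar_parametros separar_parametros_alt
  have hsp : (" " : String).toList = [' '] := by decide
  rw [PySem.Str.find_eq, hsp]
  by_cases hneg : PySem.Chars.find p.toList [' '] = -1
  · have hmem : ' ' ∉ p.toList := by
      rw [PySem.Chars.find_eq_neg_one_iff] at hneg
      exact fun h => hneg ((singleton_infix_iff ' ' _).2 h)
    simp [hneg, sepA_loop_no_space _ hmem]
  · have h0 : 0 ≤ PySem.Chars.find p.toList [' '] := by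
      have := PySem.Chars.neg_one_le_find p.toList [' ']
      omega
    obtain ⟨h1, h2⟩ := PySem.Chars.find_spec h0
    have hlen : (PySem.Chars.find p.toList [' ']).toNat < p.toList.length := by
      have hle := PySem.Chars.find_le_length p.toList [' ']
      rcases Nat.lt_or_ge (PySem.Chars.find p.toList [' ']).toNat p.toList.length with h | h
      · exact h
      · exfalso
        have hdrop : p.toList.drop (PySem.Chars.find p.toList [' ']).toNat = [] :=
          List.drop_eq_nil_of_le h
        rw [hdrop] at h1
        exact absurd (List.prefix_nil.mp h1) (by simp)
    have hget := (singleton_prefix_drop ' ' p.toList _ hlen).1 h1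
    have hA := sepA_loop_space p.toList (PySem.Chars.find p.toList [' ']).toNat hlen hget
      (fun i hi he => h2 i hi ((singleton_prefix_drop ' ' p.toList i (by omega)).2 he)) []
    rw [hA]
    have e1 : String.ofList ([] ++ p.toList.take (PySem.Chars.find p.toList [' ']).toNat)
        = PySem.Str.slice p none (some (PySem.Chars.find p.toList " ".toList)) := by
      apply String.toList_injective
      rw [PySem.Str.toList_slice, hsp]
      simp [PySem.Chars.slice, PySem.List.slice_to _ h0]
    have e2 : String.ofList (p.toList.drop ((PySem.Chars.find p.toList [' ']).toNat + 1))
        = PySem.Str.slice p (some (PySem.Chars.find p.toList " ".toList + 1)) none := by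
      apply String.toList_injective
      rw [PySem.Str.toList_slice, hsp]
      have h3 : (PySem.Chars.find p.toList [' '] + 1).toNat = (PySem.Chars.find p.toList [' ']).toNat + 1 := by omega
      simp [PySem.Chars.slice, PySem.List.slice_from _ (by omega : (0:Int) ≤ PySem.Chars.find p.toList [' '] + 1), h3]
    rw [e1, e2]
    simp [hsp]
    exact hneg
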